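-- pv_equiv track=rewrite | github.com/dandaprathyusha/NLP_ML_experiments | dialog_data_intent_extraction/data_creation/tourist_code/denorm_create_data_intermediate.py | generator_denorm_all_user_type
-- ===== SOURCE A (Python) =====
-- def generator_denorm_all_user_type(denorm_all_user_place_list, denorm_all_user_type_list, tags_place_dict, tags_type_dict, all_sys_responses_list, silence_user):
--     for denorm_all_user_type_list_item in denorm_all_user_type_list:
--         for denorm_all_user_place_list_item in denorm_all_user_place_list:
--             place_type = list()
--             for key, value in tags_place_dict.items():
--                 if key in denorm_all_user_place_list_item:
--                     place_type.append(value)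
--             for key, value in tags_type_dict.items():
--                 for item in value:
--                     if item in denorm_all_user_type_list_item:
--                         place_type.append(key)
--             substory_list = list()
--             itr = 1
--             substory_list.append(str(
--                 itr) + ' ' + denorm_all_user_type_list_item + "\t" + all_sys_responses_list[0])
--             itr += 1
--             substory_list.append(
--                 str(itr) + ' ' + silence_user + "\t" + all_sys_responses_list[2])
--             itr += 1
--             substory_list.append(str(
--                 itr) + ' ' + denorm_all_user_place_list_item + "\t" + all_sys_responses_list[0])
--             itr += 1
--             substory_list.append(
--                 str(itr) + ' ' + silence_user + "\t" + all_sys_responses_list[3])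
--             itr += 1
--             temp_string = str(itr) + ' ' + silence_user + '\tapi_call'
--             for item in place_type:
--                 temp_string += ' ' + item
--             substory_list.append(temp_string)
--             k = '\n'.join(substory_list) + "\n\n"
-- #            output_file.write('\n'.join(substory_list) + "\n\n")
--             yield k
-- ===== SOURCE B (Python) =====
-- def generator_denorm_all_user_type(denorm_all_user_place_list, denorm_all_user_type_list, tags_place_dict, tags_type_dict, all_sys_responses_list, silence_user):
--     # Precompute the matched tag lists once per distinct string (table build),
--     # then a plain product pass assembles each substory from the tables.
--     place_tags = {p: [v for k, v in tags_place_dict.items() if k in p]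
--                   for p in denorm_all_user_place_list}
--     type_tags = {t: [k for k, vs in tags_type_dict.items() for it in vs if it in t]
--                  for t in denorm_all_user_type_list}
--     for t in denorm_all_user_type_list:
--         tt = type_tags[t]
--         for p in denorm_all_user_place_list:
--             tags = ''.join(' ' + x for x in place_tags[p] + tt)
--             yield (f"1 {t}\t{all_sys_responses_list[0]}\n"
--                    f"2 {silence_user}\t{all_sys_responses_list[2]}\n"
--                    f"3 {p}\t{all_sys_responses_list[0]}\n"
--                    f"4 {silence_user}\t{all_sys_responses_list[3]}\n"
--                    f"5 {silence_user}\tapi_call{tags}\n\n")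
-- ===== Notes on version B (the rewrite author's own statement) =====
-- stated objective: faster
-- what changed: B precomputes, once per distinct place/type string, the matched place values and type keys in two lookup tables, so the per-pair dictionary scans of A disappear from the product loop, and assembles each substory as one f-string instead of A's itr-counter append/join loop.
import Mathlib
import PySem

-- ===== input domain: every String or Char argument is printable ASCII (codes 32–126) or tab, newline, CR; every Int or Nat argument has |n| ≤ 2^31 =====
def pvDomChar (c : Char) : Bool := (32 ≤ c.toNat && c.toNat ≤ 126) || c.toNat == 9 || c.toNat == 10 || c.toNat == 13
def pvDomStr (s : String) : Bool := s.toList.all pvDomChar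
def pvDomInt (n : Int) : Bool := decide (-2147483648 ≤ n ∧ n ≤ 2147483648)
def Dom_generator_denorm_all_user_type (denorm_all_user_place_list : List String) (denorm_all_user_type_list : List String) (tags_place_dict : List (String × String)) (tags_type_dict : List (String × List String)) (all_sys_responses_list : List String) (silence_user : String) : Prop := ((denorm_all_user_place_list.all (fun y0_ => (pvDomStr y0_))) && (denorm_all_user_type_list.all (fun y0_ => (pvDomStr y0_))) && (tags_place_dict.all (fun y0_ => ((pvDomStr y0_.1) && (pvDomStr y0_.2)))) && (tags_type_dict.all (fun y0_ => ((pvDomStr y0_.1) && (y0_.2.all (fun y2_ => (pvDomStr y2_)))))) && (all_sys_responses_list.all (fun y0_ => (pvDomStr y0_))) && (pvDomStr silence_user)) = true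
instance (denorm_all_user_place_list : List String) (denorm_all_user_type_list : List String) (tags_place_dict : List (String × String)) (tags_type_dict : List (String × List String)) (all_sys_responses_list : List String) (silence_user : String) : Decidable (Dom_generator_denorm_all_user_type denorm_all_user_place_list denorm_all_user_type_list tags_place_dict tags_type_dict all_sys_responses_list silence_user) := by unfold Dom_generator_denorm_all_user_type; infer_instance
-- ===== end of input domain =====

-- B replaces A's per-(type,place) dictionary scans by two precomputed lookup tables and a
-- single product pass assembling each substory in one concatenation (objective: faster).

-- ===== PORT A =====
def generator_denorm_all_user_type (denorm_all_user_place_list : List String) (denorm_all_user_type_list : List String) (tags_place_dict : List (String × String)) (tags_type_dict : List (String × List String)) (all_sys_responses_list : List String) (silence_user : String) : List String :=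
  denorm_all_user_type_list.foldl (fun acc denorm_all_user_type_list_item =>
    denorm_all_user_place_list.foldl (fun acc denorm_all_user_place_list_item =>
      let place_type1 := (PySem.Dict.ofList tags_place_dict).items.foldl
        (fun place_type kv => if PySem.Str.isIn kv.1 denorm_all_user_place_list_item then place_type ++ [kv.2] else place_type) []
      let place_type := (PySem.Dict.ofList tags_type_dict).items.foldl
        (fun place_type kv => kv.2.foldl
          (fun place_type item => if PySem.Str.isIn item denorm_all_user_type_list_item then place_type ++ [kv.1] else place_type)
          place_type) place_type1
      let l1 := PySem.Int.toStr 1 ++ " " ++ denorm_all_user_type_list_item ++ "\t" ++ PySem.List.pyGetD all_sys_responses_list 0 ""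
      let l2 := PySem.Int.toStr 2 ++ " " ++ silence_user ++ "\t" ++ PySem.List.pyGetD all_sys_responses_list 2 ""
      let l3 := PySem.Int.toStr 3 ++ " " ++ denorm_all_user_place_list_item ++ "\t" ++ PySem.List.pyGetD all_sys_responses_list 0 ""
      let l4 := PySem.Int.toStr 4 ++ " " ++ silence_user ++ "\t" ++ PySem.List.pyGetD all_sys_responses_list 3 ""
      let temp_string := place_type.foldl (fun temp_string item => temp_string ++ " " ++ item)
        (PySem.Int.toStr 5 ++ " " ++ silence_user ++ "\tapi_call")
      let k := PySem.Str.join "\n" [l1, l2, l3, l4, temp_string] ++ "\n\n"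
      acc ++ [k]) acc) []

-- ===== PORT B =====
def generator_denorm_all_user_type_alt (denorm_all_user_place_list : List String) (denorm_all_user_type_list : List String) (tags_place_dict : List (String × String)) (tags_type_dict : List (String × List String)) (all_sys_responses_list : List String) (silence_user : String) : List String :=
  let place_tags : PySem.Dict String (List String) :=
    denorm_all_user_place_list.foldl (fun d p =>
      d.insert p (((PySem.Dict.ofList tags_place_dict).items.filter
        (fun kv => PySem.Str.isIn kv.1 p)).map (·.2))) PySem.Dict.empty
  let type_tags : PySem.Dict String (List String) :=
    denorm_all_user_type_list.foldl (fun d t =>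
      d.insert t ((PySem.Dict.ofList tags_type_dict).items.flatMap
        (fun kv => (kv.2.filter (fun it => PySem.Str.isIn it t)).map (fun _ => kv.1)))) PySem.Dict.empty
  denorm_all_user_type_list.flatMap (fun t =>
    let tt := type_tags.getD t []
    denorm_all_user_place_list.map (fun p =>
      let tags := PySem.Str.join "" ((place_tags.getD p [] ++ tt).map (fun x => " " ++ x))
      "1 " ++ t ++ "\t" ++ PySem.List.pyGetD all_sys_responses_list 0 "" ++
      "\n2 " ++ silence_user ++ "\t" ++ PySem.List.pyGetD all_sys_responses_list 2 "" ++
      "\n3 " ++ p ++ "\t" ++ PySem.List.pyGetD all_sys_responses_list 0 "" ++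
      "\n4 " ++ silence_user ++ "\t" ++ PySem.List.pyGetD all_sys_responses_list 3 "" ++
      "\n5 " ++ silence_user ++ "\tapi_call" ++ tags ++ "\n\n"))

-- ===== PRECONDITION & SPEC =====
-- Pre_ excludes exactly the inputs where Python A raises IndexError: both loops run and
-- all_sys_responses_list has no index 3 (the body reads indices 0, 2, 3).
def Pre_generator_denorm_all_user_type (denorm_all_user_place_list : List String) (denorm_all_user_type_list : List String) (tags_place_dict : List (String × String)) (tags_type_dict : List (String × List String)) (all_sys_responses_list : List String) (silence_user : String) : Prop :=
  denorm_all_user_place_list = [] ∨ denorm_all_user_type_list = [] ∨ 4 ≤ all_sys_responses_list.length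
instance (denorm_all_user_place_list : List String) (denorm_all_user_type_list : List String) (tags_place_dict : List (String × String)) (tags_type_dict : List (String × List String)) (all_sys_responses_list : List String) (silence_user : String) : Decidable (Pre_generator_denorm_all_user_type denorm_all_user_place_list denorm_all_user_type_list tags_place_dict tags_type_dict all_sys_responses_list silence_user) := by unfold Pre_generator_denorm_all_user_type; infer_instance
def pvWitness_generator_denorm_all_user_type : List String × List String × (List (String × String)) × (List (String × List String)) × List String × String :=
  (["near the lake"], ["cheap hotel"], [("lake", "R_place")], [("hotel", ["hotel", "inn"])], ["ok", "x", "which price", "which loc"], "<SILENCE>")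
def Spec_generator_denorm_all_user_type (denorm_all_user_place_list : List String) (denorm_all_user_type_list : List String) (tags_place_dict : List (String × String)) (tags_type_dict : List (String × List String)) (all_sys_responses_list : List String) (silence_user : String) (out : List String) : Prop := out = generator_denorm_all_user_type_alt denorm_all_user_place_list denorm_all_user_type_list tags_place_dict tags_type_dict all_sys_responses_list silence_user
instance (denorm_all_user_place_list : List String) (denorm_all_user_type_list : List String) (tags_place_dict : List (String × String)) (tags_type_dict : List (String × List String)) (all_sys_responses_list : List String) (silence_user : String) (out : List String) : Decidable (Spec_generator_denorm_all_user_type denorm_all_user_place_list denorm_all_user_type_list tags_place_dict tags_type_dict all_sys_responses_list silence_user out) := by unfold Spec_generator_denorm_all_user_type; infer_instance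

-- ===== CLAIM (what is proved, stated in full; the proofs are below) =====
def Claim_equal_generator_denorm_all_user_type : Prop := ∀ (denorm_all_user_place_list : List String) (denorm_all_user_type_list : List String) (tags_place_dict : List (String × String)) (tags_type_dict : List (String × List String)) (all_sys_responses_list : List String) (silence_user : String), Dom_generator_denorm_all_user_type denorm_all_user_place_list denorm_all_user_type_list tags_place_dict tags_type_dict all_sys_responses_list silence_user → Pre_generator_denorm_all_user_type denorm_all_user_place_list denorm_all_user_type_list tags_place_dict tags_type_dict all_sys_responses_list silence_user → Spec_generator_denorm_all_user_type denorm_all_user_place_list denorm_all_user_type_list tags_place_dict tags_type_dict all_sys_responses_list silence_user (generator_denorm_all_user_type denorm_all_user_place_list denorm_all_user_type_list tags_place_dict tags_type_dict all_sys_responses_list silence_user)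

-- ===== LEMMAS AND PROOFS =====

-- flattening an intersperse with an empty separator is plain flatten
theorem pv_inter_nil (ls : List (List Char)) : (List.intersperse [] ls).flatten = ls.flatten := by
  induction ls with
  | nil => simp
  | cons a t ih =>
    cases t with
    | nil => simp
    | cons b t2 =>
      simp only [List.intersperse] at ih ⊢
      simp at ih ⊢
      simp [ih]

-- A's "temp_string += ' ' + item" loop is the prefix followed by ''.join(' ' + x …)
theorem pv_temp_foldl (pt : List String) (s : String) :
    (pt.foldl (fun s item => s ++ " " ++ item) s) = s ++ PySem.Str.join "" (pt.map (fun x => " " ++ x)) := by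
  induction pt generalizing s with
  | nil =>
    apply String.toList_inj.mp
    simp [PySem.Str.join, PySem.Chars.join, List.intercalate]
  | cons x xs ih =>
    rw [List.foldl_cons, ih]
    apply String.toList_inj.mp
    simp [PySem.Str.join, PySem.Chars.join, List.intercalate, pv_inter_nil]

-- a key not in the build list is untouched by the table-building fold
theorem pv_getD_build_not_mem {ν : Type} (f : String → ν) (xs : List String)
    (d : PySem.Dict String ν) (p : String) (d0 : ν) (h : p ∉ xs) :
    (xs.foldl (fun d x => d.insert x (f x)) d).getD p d0 = d.getD p d0 := by
  induction xs generalizing d with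
  | nil => rfl
  | cons x xs ih =>
    simp only [List.foldl_cons]
    rw [ih _ (fun hm => h (List.mem_cons_of_mem _ hm)),
        PySem.Dict.getD_insert]
    simp only [List.mem_cons, not_or] at h
    simp [h.1]

-- looking up a key of the table built by the comprehension recomputes its value
theorem pv_getD_build {ν : Type} (f : String → ν) (xs : List String)
    (d : PySem.Dict String ν) (p : String) (d0 : ν) (h : p ∈ xs) :
    (xs.foldl (fun d x => d.insert x (f x)) d).getD p d0 = f p := by
  induction xs generalizing d with
  | nil => cases h
  | cons x xs ih =>
    simp only [List.foldl_cons]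
    by_cases hm : p ∈ xs
    · exact ih _ hm
    · have hpx : p = x := by
        rcases List.mem_cons.mp h with h1 | h2
        · exact h1
        · exact absurd h2 hm
      subst hpx
      rw [pv_getD_build_not_mem f xs _ p d0 hm, PySem.Dict.getD_insert]
      simp

-- the common closed form both ports are reduced to
def pv_canon (tags_place_dict : List (String × String)) (tags_type_dict : List (String × List String)) (all_sys_responses_list : List String) (silence_user : String) (t p : String) : String :=
  let tags := PySem.Str.join "" (((((PySem.Dict.ofList tags_place_dict).items.filter
      (fun kv => PySem.Str.isIn kv.1 p)).map (·.2)) ++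
    ((PySem.Dict.ofList tags_type_dict).items.flatMap
      (fun kv => (kv.2.filter (fun it => PySem.Str.isIn it t)).map (fun _ => kv.1)))).map (fun x => " " ++ x))
  "1 " ++ t ++ "\t" ++ PySem.List.pyGetD all_sys_responses_list 0 "" ++
  "\n2 " ++ silence_user ++ "\t" ++ PySem.List.pyGetD all_sys_responses_list 2 "" ++
  "\n3 " ++ p ++ "\t" ++ PySem.List.pyGetD all_sys_responses_list 0 "" ++
  "\n4 " ++ silence_user ++ "\t" ++ PySem.List.pyGetD all_sys_responses_list 3 "" ++
  "\n5 " ++ silence_user ++ "\tapi_call" ++ tags ++ "\n\n"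

set_option maxHeartbeats 1000000 in
theorem pv_A_eq (denorm_all_user_place_list : List String) (denorm_all_user_type_list : List String) (tags_place_dict : List (String × String)) (tags_type_dict : List (String × List String)) (all_sys_responses_list : List String) (silence_user : String) :
    generator_denorm_all_user_type denorm_all_user_place_list denorm_all_user_type_list tags_place_dict tags_type_dict all_sys_responses_list silence_user =
    denorm_all_user_type_list.flatMap (fun t => denorm_all_user_place_list.map (fun p =>
      pv_canon tags_place_dict tags_type_dict all_sys_responses_list silence_user t p)) := by
  unfold generator_denorm_all_user_type
  simp only [PySem.List.foldl_append_if, PySem.List.foldl_append_eq_flatMap,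
    pv_temp_foldl, List.nil_append,
    ← List.map_eq_flatMap]
  apply List.flatMap_congr
  intro t _
  apply List.map_congr_left
  intro p _
  unfold pv_canon
  apply String.toList_inj.mp
  have h1 : PySem.Int.toStr 1 = "1" := by decide
  have h2 : PySem.Int.toStr 2 = "2" := by decide
  have h3 : PySem.Int.toStr 3 = "3" := by decide
  have h4 : PySem.Int.toStr 4 = "4" := by decide
  have h5 : PySem.Int.toStr 5 = "5" := by decide
  simp [h1, h2, h3, h4, h5, PySem.Str.join, PySem.Chars.join, List.intercalate, pv_inter_nil]

theorem pv_B_eq (denorm_all_user_place_list : List String) (denorm_all_user_type_list : List String) (tags_place_dict : List (String × String)) (tags_type_dict : List (String × List String)) (all_sys_responses_list : List String) (silence_user : String) :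
    generator_denorm_all_user_type_alt denorm_all_user_place_list denorm_all_user_type_list tags_place_dict tags_type_dict all_sys_responses_list silence_user =
    denorm_all_user_type_list.flatMap (fun t => denorm_all_user_place_list.map (fun p =>
      pv_canon tags_place_dict tags_type_dict all_sys_responses_list silence_user t p)) := by
  unfold generator_denorm_all_user_type_alt
  apply List.flatMap_congr
  intro t ht
  apply List.map_congr_left
  intro p hp
  rw [pv_getD_build _ _ _ _ _ hp, pv_getD_build _ _ _ _ _ ht]
  rfl

-- ===== VERDICT (by name: the statement is the Claim_ definition above) =====
theorem generator_denorm_all_user_type_spec : Claim_equal_generator_denorm_all_user_type := by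
  intro p1 p2 p3 p4 p5 p6 _ _
  unfold Spec_generator_denorm_all_user_type
  rw [pv_A_eq, pv_B_eq]
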